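-- pv_equiv track=rewrite | github.com/IronAdamant/Tramel | trammel/strategies.py | _order_hub_first
-- ===== SOURCE A (Python) =====
-- from typing import Any, Callable, NamedTuple
--
-- def _split_active_skipped(
--     steps: list[dict[str, Any]],
-- ) -> tuple[list[dict[str, Any]], list[dict[str, Any]]]:
--     """Separate active steps from skipped steps."""
--     active = [s for s in steps if s.get("status") != "skipped"]
--     skipped = [s for s in steps if s.get("status") == "skipped"]
--     return active, skipped
--
-- def _order_hub_first(
--     steps: list[dict[str, Any]], dep_graph: dict[str, list[str]],
-- ) -> list[dict[str, Any]]: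
--     """Network hubs first (both import many and imported by many). Skipped at end."""
--     active, skipped = _split_active_skipped(steps)
--
--     importer_counts: dict[str, int] = {}
--     for deps in dep_graph.values():
--         for d in deps:
--             importer_counts[d] = importer_counts.get(d, 0) + 1
--
--     def hub_score(s: dict[str, Any]) -> float:
--         f = s.get("file", "")
--         imports_out = len(dep_graph.get(f, []))
--         imports_in = importer_counts.get(f, 0)
--         return imports_out * imports_in
--
--     active.sort(key=hub_score, reverse=True)
--     return active + skipped
-- ===== SOURCE B (Python) =====
-- def _order_hub_first(steps, dep_graph):
--     """Network hubs first (both import many and imported by many). Skipped at end."""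
--     importer_counts = {}
--     for deps in dep_graph.values():
--         for d in deps:
--             importer_counts[d] = importer_counts.get(d, 0) + 1
--
--     def hub_score(s):
--         f = s.get("file", "")
--         return len(dep_graph.get(f, [])) * importer_counts.get(f, 0)
--
--     # Bucket sort: group steps by score in one pass, then emit buckets by
--     # descending score; only the distinct scores are ever compared.
--     buckets = {}
--     skipped = []
--     for s in steps:
--         if s.get("status") == "skipped":
--             skipped.append(s)
--         else:
--             buckets.setdefault(hub_score(s), []).append(s)
--
--     out = []
--     for score in sorted(buckets, reverse=True):
--         out.extend(buckets[score])
--     out.extend(skipped)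
--     return out
-- ===== Notes on version B (the rewrite author's own statement) =====
-- stated objective: alternative
-- what changed: Replaces A's partition + stable comparison sort of the step records by a one-pass bucket sort: steps are grouped into a dict keyed by hub score while skipped steps are collected, then buckets are emitted in descending order of the distinct scores, so only distinct scores are ever compared.
import Mathlib
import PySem

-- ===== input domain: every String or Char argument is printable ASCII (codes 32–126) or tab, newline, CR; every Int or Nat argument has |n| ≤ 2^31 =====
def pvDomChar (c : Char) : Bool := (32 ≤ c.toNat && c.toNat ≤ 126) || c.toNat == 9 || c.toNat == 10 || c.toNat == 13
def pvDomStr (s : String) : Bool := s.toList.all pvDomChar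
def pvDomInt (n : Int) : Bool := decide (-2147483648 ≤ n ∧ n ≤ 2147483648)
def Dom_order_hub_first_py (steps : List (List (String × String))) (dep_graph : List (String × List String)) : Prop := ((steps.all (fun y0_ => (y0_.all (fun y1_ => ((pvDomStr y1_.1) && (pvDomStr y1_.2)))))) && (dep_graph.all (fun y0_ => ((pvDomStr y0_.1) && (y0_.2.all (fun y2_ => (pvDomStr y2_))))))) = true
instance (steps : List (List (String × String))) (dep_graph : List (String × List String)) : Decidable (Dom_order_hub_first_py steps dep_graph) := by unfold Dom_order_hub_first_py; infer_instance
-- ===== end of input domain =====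

-- B replaces A's partition + stable comparison sort of the records by a one-pass bucket
-- grouping keyed by hub score, emitting buckets in descending order of the distinct
-- scores (alternative algorithm; not claimed faster).

-- ===== PORT A =====
-- helper: _split_active_skipped
def split_active_skipped_py (steps : List (List (String × String))) :
    List (List (String × String)) × List (List (String × String)) :=
  (steps.filter (fun s => !((PySem.Dict.ofList s).get? "status" == some "skipped")),
   steps.filter (fun s => (PySem.Dict.ofList s).get? "status" == some "skipped"))

def order_hub_first_py (steps : List (List (String × String))) (dep_graph : List (String × List String)) : List (List (String × String)) :=
  let p := split_active_skipped_py steps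
  let active := p.1
  let skipped := p.2
  let dg : PySem.Dict String (List String) := PySem.Dict.ofList dep_graph
  let importer_counts : PySem.Dict String Int :=
    dg.values.foldl (fun d deps => deps.foldl (fun d2 x => d2.insert x (d2.getD x 0 + 1)) d) PySem.Dict.empty
  let hub_score : List (String × String) → Int := fun s =>
    let f := (PySem.Dict.ofList s).getD "file" ""
    (PySem.List.len (dg.getD f [])) * importer_counts.getD f 0
  PySem.List.sorted active hub_score true ++ skipped

-- ===== PORT B =====
def order_hub_first_py_alt (steps : List (List (String × String))) (dep_graph : List (String × List String)) : List (List (String × String)) :=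
  let dg : PySem.Dict String (List String) := PySem.Dict.ofList dep_graph
  let importer_counts : PySem.Dict String Int :=
    dg.values.foldl (fun d deps => deps.foldl (fun d2 x => d2.insert x (d2.getD x 0 + 1)) d) PySem.Dict.empty
  let hub_score : List (String × String) → Int := fun s =>
    let f := (PySem.Dict.ofList s).getD "file" ""
    (PySem.List.len (dg.getD f [])) * importer_counts.getD f 0
  -- one pass: collect skipped, group the rest into score buckets
  let st := steps.foldl
    (fun (st : PySem.Dict Int (List (List (String × String))) × List (List (String × String))) s =>
      if (PySem.Dict.ofList s).get? "status" == some "skipped" then (st.1, st.2 ++ [s])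
      else (st.1.modify (hub_score s) [] (· ++ [s]), st.2))
    (PySem.Dict.empty, [])
  -- emit buckets by descending distinct score, then the skipped steps
  let out := (PySem.List.sorted st.1.keys (fun k => k) true).foldl (fun acc k => acc ++ st.1.getD k []) []
  out ++ st.2

-- ===== PRECONDITION & SPEC =====
def Spec_order_hub_first_py (steps : List (List (String × String))) (dep_graph : List (String × List String)) (out : List (List (String × String))) : Prop := out = order_hub_first_py_alt steps dep_graph
instance (steps : List (List (String × String))) (dep_graph : List (String × List String)) (out : List (List (String × String))) : Decidable (Spec_order_hub_first_py steps dep_graph out) := by unfold Spec_order_hub_first_py; infer_instance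

-- ===== CLAIM (what is proved, stated in full; the proofs are below) =====
def Claim_equal_order_hub_first_py : Prop := ∀ (steps : List (List (String × String))) (dep_graph : List (String × List String)), Dom_order_hub_first_py steps dep_graph → Spec_order_hub_first_py steps dep_graph (order_hub_first_py steps dep_graph)

-- ===== LEMMAS AND PROOFS =====

theorem flatMap_congr_mem {α β : Type} (l : List α) (f g : α → List β)
    (h : ∀ x ∈ l, f x = g x) : l.flatMap f = l.flatMap g := by
  induction l with
  | nil => simp
  | cons a l ih =>
    simp only [List.flatMap_cons, h a (by simp), ih (fun x hx => h x (by simp [hx]))]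

-- inserting is a permutation of consing
theorem insertBy_perm_cons {α : Type} (before : α → α → Bool) (x : α) (l : List α) :
    (PySem.List.insertBy before x l).Perm (x :: l) := by
  induction l with
  | nil => simp [PySem.List.insertBy]
  | cons y ys ih =>
    by_cases h : before x y = true
    · simp [PySem.List.insertBy, h]
    · simp only [PySem.List.insertBy, if_neg h]
      exact ((ih.cons y).trans (List.Perm.swap x y ys))

-- inserting a fresh element into a strictly descending list keeps it strictly descending
theorem pairwise_gt_insertBy (x : Int) (l : List Int) (hl : l.Pairwise (· > ·)) (hx : x ∉ l) :
    (PySem.List.insertBy (fun a b => decide (b < a)) x l).Pairwise (· > ·) := by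
  induction l with
  | nil => simp [PySem.List.insertBy]
  | cons y ys ih =>
    rcases List.pairwise_cons.1 hl with ⟨hy, hys⟩
    by_cases h : (decide (y < x) : Bool) = true
    · simp only [PySem.List.insertBy, if_pos h]
      refine List.pairwise_cons.2 ⟨?_, hl⟩
      intro z hz
      rcases List.mem_cons.1 hz with rfl | hz
      · exact of_decide_eq_true h
      · exact lt_trans (hy z hz) (of_decide_eq_true h)
    · simp only [PySem.List.insertBy, if_neg h]
      refine List.pairwise_cons.2 ⟨?_, ih hys (fun m => hx (List.mem_cons_of_mem _ m))⟩
      intro z hz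
      rcases (PySem.List.mem_insertBy _ _ _ _).1 hz with rfl | hz
      · have hnlt : ¬ y < z := by simpa using h
        rcases lt_trichotomy z y with h1 | h1 | h1
        · exact h1
        · exact absurd h1.symm (by intro hh; exact hx (by simp [hh]))
        · exact absurd h1 hnlt
      · exact hy z hz

-- x goes past a prefix none of whose elements it precedes
theorem insertBy_append_not_before {α : Type} (before : α → α → Bool) (x : α) (l r : List α)
    (h : ∀ a ∈ l, before x a = false) :
    PySem.List.insertBy before x (l ++ r) = l ++ PySem.List.insertBy before x r := by
  induction l with
  | nil => simp
  | cons a l ih =>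
    have ha : before x a = false := h a (by simp)
    simp only [List.cons_append, PySem.List.insertBy, ha, if_neg Bool.false_ne_true]
    rw [ih (fun b hb => h b (by simp [hb]))]

-- x goes in front of a list all of whose elements it precedes
theorem insertBy_all_before {α : Type} (before : α → α → Bool) (x : α) (r : List α)
    (h : ∀ a ∈ r, before x a = true) :
    PySem.List.insertBy before x r = x :: r := by
  cases r with
  | nil => simp [PySem.List.insertBy]
  | cons a rs => simp [PySem.List.insertBy, h a (by simp)]

-- inserting x into a bucket decomposition appends it to (or creates) its score bucket
theorem ins_flat {α : Type} (key : α → Int) (x : α) (v : Int) (hv : key x = v)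
    (ks : List Int) (hks : ks.Pairwise (· > ·)) (B : Int → List α)
    (hB : ∀ k ∈ ks, ∀ a ∈ B k, key a = k) (hBv : v ∉ ks → B v = []) :
    PySem.List.insertBy (fun a b => decide (key b < key a)) x (ks.flatMap B)
      = (if v ∈ ks then ks else PySem.List.insertBy (fun a b => decide (b < a)) v ks).flatMap
          (fun k => B k ++ if k = v then [x] else []) := by
  induction ks with
  | nil =>
    rw [if_neg (by simp)]
    simp [PySem.List.insertBy, hBv (by simp)]
  | cons k ks ih =>
    rcases List.pairwise_cons.1 hks with ⟨hk, hks'⟩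
    rcases lt_trichotomy v k with hlt | heq | hgt
    · -- v < k : x passes bucket k
      have hne : v ≠ k := ne_of_lt hlt
      rw [List.flatMap_cons,
        insertBy_append_not_before _ x (B k) (ks.flatMap B)
          (by intro a ha; simp [hB k (by simp) a ha, hv, not_lt.2 (le_of_lt hlt)]),
        ih hks' (fun k' hk' a ha => hB k' (by simp [hk']) a ha)
          (fun hnv => hBv (by simp [hne, hnv]))]
      by_cases hvks : v ∈ ks
      · rw [if_pos hvks, if_pos (by simp [hvks]), List.flatMap_cons]
        simp [Ne.symm hne]
      · have hvnot : v ∉ k :: ks := by simp [hne, hvks]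
        rw [if_neg hvks, if_neg hvnot]
        have hins : PySem.List.insertBy (fun a b => decide (b < a)) v (k :: ks)
            = k :: PySem.List.insertBy (fun a b => decide (b < a)) v ks := by
          simp [PySem.List.insertBy, not_lt.2 (le_of_lt hlt)]
        rw [hins, List.flatMap_cons]
        simp [Ne.symm hne]
    · -- v = k : x appended at the end of bucket k
      subst heq
      rw [if_pos (by simp), List.flatMap_cons,
        insertBy_append_not_before _ x (B v) (ks.flatMap B)
          (by intro a ha; simp [hB v (by simp) a ha, hv]),
        insertBy_all_before _ x (ks.flatMap B)
          (by intro a ha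
              rcases List.mem_flatMap.1 ha with ⟨k', hk', ha'⟩
              simp only [hB k' (by simp [hk']) a ha', hv]
              simp [hk k' hk']),
        List.flatMap_cons]
      have hrest : ks.flatMap (fun k' => B k' ++ if k' = v then [x] else []) = ks.flatMap B := by
        refine flatMap_congr_mem _ _ _ ?_
        intro k' hk'
        have : k' ≠ v := ne_of_lt (hk k' hk')
        simp [this]
      simp [hrest]
    · -- v > k : x (and its fresh bucket) go in front
      have hvnot : v ∉ k :: ks := by
        intro hm
        rcases List.mem_cons.1 hm with heq | hm
        · exact absurd (heq ▸ hgt) (lt_irrefl k)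
        · exact absurd (hk v hm) (not_lt.2 (le_of_lt hgt))
      rw [if_neg hvnot]
      have hBvnil : B v = [] := hBv hvnot
      have hfront : PySem.List.insertBy (fun a b => decide (b < a)) v (k :: ks) = v :: k :: ks := by
        simp [PySem.List.insertBy, hgt]
      rw [hfront,
        insertBy_all_before _ x ((k :: ks).flatMap B)
          (by intro a ha
              rcases List.mem_flatMap.1 ha with ⟨k', hk', ha'⟩
              have hk'le : k' ≤ k := by
                rcases List.mem_cons.1 hk' with rfl | hk'
                · exact le_refl _
                · exact le_of_lt (hk k' hk')
              simp only [hB k' hk' a ha', hv]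
              simp [lt_of_le_of_lt hk'le hgt]),
        List.flatMap_cons]
      have hrest : (k :: ks).flatMap (fun k' => B k' ++ if k' = v then [x] else [])
          = (k :: ks).flatMap B := by
        refine flatMap_congr_mem _ _ _ ?_
        intro k' hk'
        have hk'le : k' ≤ k := by
          rcases List.mem_cons.1 hk' with rfl | hk'
          · exact le_refl _
          · exact le_of_lt (hk k' hk')
        have : k' ≠ v := ne_of_lt (lt_of_le_of_lt hk'le hgt)
        simp [this]
      simp [hrest, hBvnil]

-- adding a fresh value to a descending sorted dedup list inserts it in place
theorem sortedRev_append_fresh (S : List Int) (hS : S.Nodup) (v : Int) (hv : v ∉ S) :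
    PySem.List.sorted (S ++ [v]) (fun k => k) true
      = PySem.List.insertBy (fun a b => decide (b < a)) v (PySem.List.sorted S (fun k => k) true) := by
  have hperm : (PySem.List.insertBy (fun a b => decide (b < a)) v (PySem.List.sorted S (fun k => k) true)).Perm (S ++ [v]) := by
    refine ((insertBy_perm_cons _ _ _).trans ?_)
    refine ((PySem.List.sorted_perm S (fun k => k) true).cons v).trans ?_
    simpa using (List.perm_append_comm (l₁ := [v]) (l₂ := S))
  have hsorted : (PySem.List.sorted S (fun k => k) true).Pairwise (· > ·) := by
    have h1 : (PySem.List.sorted S (fun k => k) true).Pairwise (fun a b => b ≤ a) :=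
      PySem.List.sorted_pairwise_rev S (fun k => k)
    have h2 : (PySem.List.sorted S (fun k => k) true).Nodup :=
      ((PySem.List.sorted_perm S (fun k => k) true).nodup_iff).2 hS
    exact (h1.and h2).imp (fun {a b} hab => lt_of_le_of_ne hab.1 (Ne.symm hab.2))
  have hvks : v ∉ PySem.List.sorted S (fun k => k) true := by
    rw [PySem.List.mem_sorted]; exact hv
  exact PySem.List.sorted_rev_eq_of_perm_of_pairwise_gt _ _ _ hperm
    (pairwise_gt_insertBy v _ hsorted hvks)

-- main bucket-sort characterization of Python's stable reverse sort
theorem sortedRev_eq_flatMap_buckets {α : Type} (key : α → Int) (xs : List α) :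
    PySem.List.sorted xs key true
      = (PySem.List.sorted (PySem.Set.ofList (xs.map key)) (fun k => k) true).flatMap
          (fun k => xs.filter (fun a => key a == k)) := by
  induction xs using List.reverseRecOn with
  | nil => simp [PySem.List.sorted]
  | append_singleton xs x ih =>
    rw [PySem.List.sorted_rev_eq_foldl_insertBy, List.foldl_append, List.foldl_cons, List.foldl_nil,
      ← PySem.List.sorted_rev_eq_foldl_insertBy, ih]
    set ks := PySem.List.sorted (PySem.Set.ofList (xs.map key)) (fun k => k) true with hksdef
    have hksnodup : ks.Nodup :=
      ((PySem.List.sorted_perm _ (fun k => k) true).nodup_iff).2 (PySem.Set.nodup_ofList _)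
    have hkssorted : ks.Pairwise (· > ·) := by
      have h1 : ks.Pairwise (fun a b => b ≤ a) := PySem.List.sorted_pairwise_rev _ (fun k => k)
      exact (h1.and hksnodup).imp (fun {a b} hab => lt_of_le_of_ne hab.1 (Ne.symm hab.2))
    have hmemks : ∀ k, k ∈ ks ↔ k ∈ xs.map key := by
      intro k
      rw [hksdef, PySem.List.mem_sorted, PySem.Set.mem_ofList]
    rw [ins_flat key x (key x) rfl ks hkssorted
      (fun k => xs.filter (fun a => key a == k))
      (fun k _ a ha => by simpa using (List.mem_filter.1 ha).2)
      (fun hnv => by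
        rw [List.filter_eq_nil_iff]
        intro a ha
        simp only [beq_iff_eq]
        intro hkey
        exact hnv ((hmemks _).2 (List.mem_map.2 ⟨a, ha, hkey⟩)))]
    have hset : PySem.Set.ofList ((xs ++ [x]).map key)
        = PySem.Set.add (PySem.Set.ofList (xs.map key)) (key x) := by
      simp [PySem.Set.ofList_append, PySem.Set.update]
    by_cases hvin : key x ∈ ks
    · have : PySem.Set.add (PySem.Set.ofList (xs.map key)) (key x) = PySem.Set.ofList (xs.map key) := by
        unfold PySem.Set.add
        rw [if_pos]
        simpa [PySem.Set.contains] using (PySem.Set.mem_ofList _ _).2 ((hmemks _).1 hvin)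
      rw [if_pos hvin, hset, this, ← hksdef]
      refine flatMap_congr_mem _ _ _ ?_
      intro k hkmem
      by_cases hkv : k = key x
      · subst hkv; simp [List.filter_append]
      · have hkv' : ¬(key x = k) := fun h => hkv h.symm
        simp [List.filter_append, hkv, hkv']
    · have hfresh : key x ∉ PySem.Set.ofList (xs.map key) := by
        intro h
        exact hvin ((hmemks _).2 ((PySem.Set.mem_ofList _ _).1 h))
      have : PySem.Set.add (PySem.Set.ofList (xs.map key)) (key x)
          = PySem.Set.ofList (xs.map key) ++ [key x] := by
        unfold PySem.Set.add
        rw [if_neg]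
        simpa [PySem.Set.contains] using hfresh
      rw [if_neg hvin, hset, this,
        sortedRev_append_fresh _ (PySem.Set.nodup_ofList _) _ hfresh, ← hksdef]
      refine flatMap_congr_mem _ _ _ ?_
      intro k hkmem
      by_cases hkv : k = key x
      · subst hkv; simp [List.filter_append]
      · have hkv' : ¬(key x = k) := fun h => hkv h.symm
        simp [List.filter_append, hkv, hkv']

-- the whole program, generically in the skip test q and the score function hub:
-- partition + stable reverse sort (A) = one-pass bucket grouping + descending bucket emission (B)
theorem main_core (q : List (String × String) → Bool) (hub : List (String × String) → Int)
    (steps : List (List (String × String))) :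
    PySem.List.sorted (steps.filter (fun s => !q s)) hub true ++ steps.filter q
      = (let st := steps.foldl
            (fun (st : PySem.Dict Int (List (List (String × String))) × List (List (String × String))) s =>
              if q s then (st.1, st.2 ++ [s])
              else (st.1.modify (hub s) [] (· ++ [s]), st.2))
            (PySem.Dict.empty, ([] : List (List (String × String))))
         (PySem.List.sorted st.1.keys (fun k => k) true).foldl (fun acc k => acc ++ st.1.getD k []) [] ++ st.2) := by
  have hsplit : (fun (st : PySem.Dict Int (List (List (String × String))) × List (List (String × String))) s =>
      if q s then (st.1, st.2 ++ [s])
      else (st.1.modify (hub s) [] (· ++ [s]), st.2))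
      = fun st s => ((fun d s => if q s then d else d.modify (hub s) [] (· ++ [s])) st.1 s,
                     (fun sk s => if q s then sk ++ [s] else sk) st.2 s) := by
    funext st s
    by_cases h : q s <;> simp [h]
  have hfold : steps.foldl
      (fun (st : PySem.Dict Int (List (List (String × String))) × List (List (String × String))) s =>
        if q s then (st.1, st.2 ++ [s])
        else (st.1.modify (hub s) [] (· ++ [s]), st.2))
      (PySem.Dict.empty, []) =
    (steps.foldl (fun d s => if q s then d else d.modify (hub s) [] (· ++ [s])) PySem.Dict.empty,
     steps.foldl (fun sk s => if q s then sk ++ [s] else sk) []) := by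
    rw [hsplit]
    exact PySem.List.foldl_prod_mk
      (fun d s => if q s = true then d else d.modify (hub s) [] fun x => x ++ [s])
      (fun sk s => if q s = true then sk ++ [s] else sk) steps PySem.Dict.empty []
  rw [hfold]
  simp only []
  -- the skipped accumulator is a filter
  have hsk : steps.foldl (fun sk s => if q s then sk ++ [s] else sk) [] = steps.filter q := by
    simpa using PySem.List.foldl_append_if_eq_filter q steps []
  -- the bucket fold is a fold over the active steps
  have hflip : (fun (d : PySem.Dict Int (List (List (String × String)))) s =>
      if q s then d else d.modify (hub s) [] (· ++ [s]))
      = fun d s => if (!q s) then d.modify (hub s) [] (· ++ [s]) else d := by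
    funext d s
    by_cases h : q s <;> simp [h]
  have hbk : steps.foldl (fun (d : PySem.Dict Int (List (List (String × String)))) s =>
        if q s then d else d.modify (hub s) [] (· ++ [s])) PySem.Dict.empty
      = (steps.filter (fun s => !q s)).foldl
          (fun d s => d.modify (hub s) [] (· ++ [s])) PySem.Dict.empty := by
    rw [hflip, PySem.List.foldl_if_eq_foldl_filter (fun s => !q s) _ steps _]
  rw [hsk, hbk]
  set active := steps.filter (fun s => !q s) with hactive
  set bk := active.foldl (fun d s => d.modify (hub s) [] (· ++ [s])) PySem.Dict.empty with hbkdef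
  have hgetD : ∀ k, bk.getD k [] = active.filter (fun s => hub s == k) := by
    intro k
    have hmapped : bk = (active.map (fun s => ((hub s : Int), s))).foldl
        (fun d p => d.modify p.1 [] (· ++ [p.2])) PySem.Dict.empty := by
      rw [List.foldl_map]
    rw [hmapped, PySem.Dict.getD_foldl_modify_append]
    simp [List.filter_map, Function.comp_def]
  have hkeys : bk.keys = PySem.Set.ofList (active.map hub) := by
    rw [hbkdef, PySem.Dict.keys_foldl_modify_key active hub [] (fun _ s => (· ++ [s]))]
    simp [PySem.Set.update_nil_left]
  rw [PySem.List.foldl_append_eq_flatMap]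
  simp only [hgetD, hkeys, List.nil_append]
  rw [sortedRev_eq_flatMap_buckets hub active]

-- ===== VERDICT (by name: the statement is the Claim_ definition above) =====
theorem order_hub_first_py_spec : Claim_equal_order_hub_first_py := by
  intro steps dep_graph _
  unfold Spec_order_hub_first_py order_hub_first_py order_hub_first_py_alt split_active_skipped_py
  exact main_core _ _ steps
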